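-- pv_equiv track=rewrite | github.com/BrunoFernandes25/LA-II | Treino3/validas.py | verifica_somas
-- ===== SOURCE A (Python) =====
-- def verifica_somas(lista,soma):
--     for i_num in range(0,len(lista)):
--         if lista[i_num] == soma:
--             return 1
--         for j_num in range(i_num+1,len(lista)):   # verificar a soma com cada numero a frente da lista
--             #if soma_nums == soma:
--             if lista[i_num] + lista[j_num] == soma:
--                 return 1
--         res = lista[i_num]
--         for k_num in range(i_num+1,len(lista)): #verificar a soma de cada subsequencia
--             res = res + lista[k_num]
--             if res == soma:
--                 return 1
--
--     return -1
-- ===== SOURCE B (Python) =====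
-- def verifica_somas(lista, soma):
--     # O(n) two passes: hash set for single/pair, prefix-sum hash set for contiguous runs of length >= 2
--     seen = set()
--     for x in lista:
--         if x == soma or (soma - x) in seen:
--             return 1
--         seen.add(x)
--     prefixes = set()
--     p = 0
--     for x in lista:
--         prev = p          # prefix sum before x
--         p = p + x
--         if (p - soma) in prefixes:   # prefixes lag one step: subarray length >= 2
--             return 1
--         prefixes.add(prev)
--     return -1
-- ===== Notes on version B (the rewrite author's own statement) =====
-- stated objective: faster
-- what changed: Replaces the nested index loops (per-start pair scan and per-start running subarray sum) by two O(n) hash-set passes: a two-sum pass keeping the set of seen elements, then a prefix-sum pass keeping a lagged set of earlier prefix sums for contiguous subarrays of length >= 2.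
import Mathlib
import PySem

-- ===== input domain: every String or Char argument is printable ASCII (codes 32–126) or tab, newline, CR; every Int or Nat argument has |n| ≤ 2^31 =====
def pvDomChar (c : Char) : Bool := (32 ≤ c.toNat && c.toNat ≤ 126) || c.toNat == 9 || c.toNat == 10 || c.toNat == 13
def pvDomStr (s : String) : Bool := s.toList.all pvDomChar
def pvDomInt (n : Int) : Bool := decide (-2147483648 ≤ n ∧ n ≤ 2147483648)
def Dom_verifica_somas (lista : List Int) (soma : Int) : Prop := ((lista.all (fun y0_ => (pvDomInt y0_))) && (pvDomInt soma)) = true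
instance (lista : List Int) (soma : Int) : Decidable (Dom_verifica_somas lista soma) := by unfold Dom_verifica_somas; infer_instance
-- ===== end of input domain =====

-- B replaces A's nested quadratic scans by two linear hash-set passes (two-sum set + lagged prefix-sum set); measured asymptotically faster.


-- ===== PORT A =====
-- inner 'for j_num' loop with early return: any over the suffix ahead of position i
def aPairFrom (soma x : Int) (xs : List Int) : Bool :=
  xs.any (fun y => decide (x + y = soma))

-- inner 'for k_num' loop: running sum 'res' over the suffix, early return on hit
def aSubFrom (soma : Int) : Int → List Int → Bool
  | _, [] => false
  | res, y :: ys => if res + y = soma then true else aSubFrom soma (res + y) ys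

-- outer 'for i_num' loop over the list (suffix recursion = index loop over lista[i:])
def aGo (soma : Int) : List Int → Int
  | [] => -1
  | x :: xs =>
      if x = soma then 1
      else if aPairFrom soma x xs then 1
      else if aSubFrom soma x xs then 1
      else aGo soma xs

def verifica_somas (lista : List Int) (soma : Int) : Int :=
  aGo soma lista

-- ===== PORT B =====
-- first pass of Source B: seen-set two-sum scan (also catches singletons)
def bTwo (soma : Int) : PySem.Set Int → List Int → Bool
  | _, [] => false
  | seen, x :: xs =>
      if x = soma ∨ (soma - x) ∈ seen then true
      else bTwo soma (PySem.Set.add seen x) xs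

-- second pass of Source B: prefix-sum scan, prefixes added one step late (subarray length ≥ 2)
def bPref (soma : Int) : PySem.Set Int → Int → List Int → Bool
  | _, _, [] => false
  | prefs, p, x :: xs =>
      let p' := p + x
      if (p' - soma) ∈ prefs then true
      else bPref soma (PySem.Set.add prefs p) p' xs

def verifica_somas_alt (lista : List Int) (soma : Int) : Int :=
  if bTwo soma PySem.Set.empty lista then 1
  else if bPref soma PySem.Set.empty 0 lista then 1
  else -1

-- ===== PRECONDITION & SPEC =====
def Spec_verifica_somas (lista : List Int) (soma : Int) (out : Int) : Prop := out = verifica_somas_alt lista soma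
instance (lista : List Int) (soma : Int) (out : Int) : Decidable (Spec_verifica_somas lista soma out) := by unfold Spec_verifica_somas; infer_instance

-- ===== CLAIM (what is proved, stated in full; the proofs are below) =====
def Claim_equal_verifica_somas : Prop := ∀ (lista : List Int) (soma : Int), Dom_verifica_somas lista soma → Spec_verifica_somas lista soma (verifica_somas lista soma)

-- ===== LEMMAS AND PROOFS =====

-- the condition under which both programs answer 1, phrased along A's traversal
def CondA (soma : Int) (l : List Int) : Prop :=
  ∃ u x v, l = u ++ x :: v ∧
    (x = soma ∨ (∃ y ∈ v, x + y = soma) ∨ (∃ c, c <+: v ∧ c ≠ [] ∧ x + c.sum = soma))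

lemma aGo_one_or_neg (soma : Int) (l : List Int) : aGo soma l = 1 ∨ aGo soma l = -1 := by
  induction l with
  | nil => right; rfl
  | cons x xs ih => simp only [aGo]; split_ifs <;> simp [ih]

lemma aPairFrom_iff (soma x : Int) (xs : List Int) :
    aPairFrom soma x xs = true ↔ ∃ y ∈ xs, x + y = soma := by
  simp [aPairFrom]

lemma aSubFrom_iff (soma : Int) (l : List Int) : ∀ res : Int,
    (aSubFrom soma res l = true ↔ ∃ c, c <+: l ∧ c ≠ [] ∧ res + c.sum = soma) := by
  induction l with
  | nil =>
      intro res
      simp [aSubFrom]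
  | cons y ys ih =>
      intro res
      simp only [aSubFrom]
      split_ifs with h
      · simp only [true_iff]
        exact ⟨[y], ⟨ys, rfl⟩, by simp, by simpa using h⟩
      · rw [ih (res + y)]
        constructor
        · rintro ⟨c, hc, hne, hsum⟩
          exact ⟨y :: c, (List.cons_prefix_cons).mpr ⟨rfl, hc⟩, by simp, by simpa [add_assoc] using hsum⟩
        · rintro ⟨c, hc, hne, hsum⟩
          rcases c with _ | ⟨z, c'⟩
          · exact absurd rfl hne
          · rcases (List.cons_prefix_cons).mp hc with ⟨rfl, hc'⟩
            rcases c' with _ | ⟨w, c''⟩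
            · exact absurd (by simpa using hsum) h
            · exact ⟨w :: c'', hc', by simp, by simpa [add_assoc] using hsum⟩

lemma aGo_eq_one_iff (soma : Int) (l : List Int) : aGo soma l = 1 ↔ CondA soma l := by
  induction l with
  | nil =>
      simp only [aGo, CondA]
      constructor
      · intro h; omega
      · rintro ⟨u, x, v, h, -⟩; simp at h
  | cons x xs ih =>
      simp only [aGo]
      split_ifs with h1 h2 h3
      · exact iff_of_true rfl ⟨[], x, xs, rfl, Or.inl h1⟩
      · exact iff_of_true rfl ⟨[], x, xs, rfl, Or.inr (Or.inl ((aPairFrom_iff soma x xs).mp h2))⟩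
      · exact iff_of_true rfl ⟨[], x, xs, rfl, Or.inr (Or.inr ((aSubFrom_iff soma xs x).mp h3))⟩
      · rw [ih]
        constructor
        · rintro ⟨u, y, v, rfl, hd⟩
          exact ⟨x :: u, y, v, rfl, hd⟩
        · rintro ⟨u, y, v, heq, hd⟩
          rcases u with _ | ⟨x', u'⟩
          · simp only [List.nil_append, List.cons.injEq] at heq
            rcases heq with ⟨rfl, rfl⟩
            rcases hd with h | h | h
            · exact absurd h h1
            · exact absurd ((aPairFrom_iff soma _ _).mpr h) h2
            · exact absurd ((aSubFrom_iff soma _ _).mpr h) h3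
          · simp only [List.cons_append, List.cons.injEq] at heq
            rcases heq with ⟨rfl, rfl⟩
            exact ⟨u', y, v, rfl, hd⟩

lemma bTwo_iff (soma : Int) (l : List Int) : ∀ seen : PySem.Set Int,
    (bTwo soma seen l = true ↔
      ∃ u x v, l = u ++ x :: v ∧ (x = soma ∨ ∃ z, (z ∈ seen ∨ z ∈ u) ∧ z + x = soma)) := by
  induction l with
  | nil =>
      intro seen
      constructor
      · intro h; simp [bTwo] at h
      · rintro ⟨u, x, v, h, -⟩; simp at h
  | cons x xs ih =>
      intro seen
      simp only [bTwo]
      split_ifs with h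
      · simp only [true_iff]
        rcases h with h | h
        · exact ⟨[], x, xs, rfl, Or.inl h⟩
        · exact ⟨[], x, xs, rfl, Or.inr ⟨soma - x, Or.inl h, by ring⟩⟩
      · rw [ih (PySem.Set.add seen x)]
        push_neg at h
        constructor
        · rintro ⟨u, y, v, rfl, hd⟩
          refine ⟨x :: u, y, v, rfl, ?_⟩
          rcases hd with hy | ⟨z, hz, hzs⟩
          · exact Or.inl hy
          · refine Or.inr ⟨z, ?_, hzs⟩
            rcases hz with hz | hz
            · rcases (PySem.Set.mem_add _ _ _).mp hz with hz | rfl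
              · exact Or.inl hz
              · exact Or.inr (List.mem_cons_self)
            · exact Or.inr (List.mem_cons_of_mem _ hz)
        · rintro ⟨u, y, v, heq, hd⟩
          rcases u with _ | ⟨x', u'⟩
          · simp only [List.nil_append, List.cons.injEq] at heq
            rcases heq with ⟨rfl, rfl⟩
            rcases hd with hy | ⟨z, hz, hzs⟩
            · exact absurd hy h.1
            · rcases hz with hz | hz
              · exact absurd (by rw [show soma - x = z by omega]; exact hz) h.2
              · simp at hz
          · simp only [List.cons_append, List.cons.injEq] at heq
            rcases heq with ⟨rfl, rfl⟩
            refine ⟨u', y, v, rfl, ?_⟩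
            rcases hd with hy | ⟨z, hz, hzs⟩
            · exact Or.inl hy
            · refine Or.inr ⟨z, ?_, hzs⟩
              rcases hz with hz | hz
              · exact Or.inl ((PySem.Set.mem_add _ _ _).mpr (Or.inl hz))
              · rcases List.mem_cons.mp hz with rfl | hz
                · exact Or.inl ((PySem.Set.mem_add _ _ _).mpr (Or.inr rfl))
                · exact Or.inr hz

lemma bPref_iff (soma : Int) (l : List Int) : ∀ (prefs : PySem.Set Int) (p : Int),
    (bPref soma prefs p l = true ↔
      (∃ c, c <+: l ∧ c ≠ [] ∧ (p + c.sum - soma) ∈ prefs) ∨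
      (∃ u m v, l = u ++ m ++ v ∧ 2 ≤ m.length ∧ m.sum = soma)) := by
  induction l with
  | nil =>
      intro prefs p
      constructor
      · intro h; simp [bPref] at h
      · rintro (⟨c, hc, hne, -⟩ | ⟨u, m, v, heq, hm, -⟩)
        · exact absurd (List.prefix_nil.mp hc) hne
        · rcases List.append_eq_nil_iff.mp (List.append_eq_nil_iff.mp heq.symm).1 with ⟨-, rfl⟩
          simp at hm
  | cons x xs ih =>
      intro prefs p
      simp only [bPref]
      split_ifs with h
      · simp only [true_iff]
        exact Or.inl ⟨[x], ⟨xs, rfl⟩, by simp, by simpa [add_sub_assoc] using h⟩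
      · rw [ih (PySem.Set.add prefs p) (p + x)]
        constructor
        · rintro (⟨c, hc, hne, hmem⟩ | ⟨u, m, v, rfl, hm, hs⟩)
          · rcases (PySem.Set.mem_add _ _ _).mp hmem with hmem | heq
            · exact Or.inl ⟨x :: c, (List.cons_prefix_cons).mpr ⟨rfl, hc⟩, by simp,
                by rw [show p + (x :: c).sum - soma = p + x + c.sum - soma by simp; ring]; exact hmem⟩
            · rcases hc with ⟨v, rfl⟩
              refine Or.inr ⟨[], x :: c, v, by simp, by simpa [Nat.succ_le_iff, List.length_pos_iff] using hne, ?_⟩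
              simp only [List.sum_cons]
              omega
          · exact Or.inr ⟨x :: u, m, v, rfl, hm, hs⟩
        · rintro (⟨c, hc, hne, hmem⟩ | ⟨u, m, v, heq, hm, hs⟩)
          · rcases c with _ | ⟨y, c'⟩
            · exact absurd rfl hne
            · rcases (List.cons_prefix_cons).mp hc with ⟨rfl, hc'⟩
              rcases c' with _ | ⟨w, c''⟩
              · exact absurd (by simpa [add_sub_assoc] using hmem) h
              · refine Or.inl ⟨w :: c'', hc', by simp, (PySem.Set.mem_add _ _ _).mpr (Or.inl ?_)⟩
                simp only [List.sum_cons, ← add_assoc] at hmem ⊢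
                exact hmem
          · rcases u with _ | ⟨x', u'⟩
            · rcases m with _ | ⟨y, m'⟩
              · simp at hm
              · simp only [List.nil_append, List.cons_append, List.cons.injEq] at heq
                rcases heq with ⟨rfl, rfl⟩
                have hm' : m' ≠ [] := by
                  intro hnil; rw [hnil] at hm; simp at hm
                refine Or.inl ⟨m', ⟨v, rfl⟩, hm', ?_⟩
                have : p + x + m'.sum - soma = p := by
                  simp only [List.sum_cons] at hs; omega
                rw [this]
                exact (PySem.Set.mem_add _ _ _).mpr (Or.inr rfl)
            · simp only [List.cons_append, List.cons.injEq, List.append_assoc] at heq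
              rcases heq with ⟨rfl, rfl⟩
              exact Or.inr ⟨u', m, v, by simp, hm, hs⟩

-- the pair decomposition looking forward equals the one looking backward (swap the two elements)
lemma pair_symm (soma : Int) (l : List Int) :
    (∃ u x v, l = u ++ x :: v ∧ ∃ y ∈ v, x + y = soma) ↔
    (∃ u x v, l = u ++ x :: v ∧ ∃ z ∈ u, z + x = soma) := by
  constructor
  · rintro ⟨u, x, v, rfl, y, hy, hs⟩
    rcases List.append_of_mem hy with ⟨v1, v2, rfl⟩
    exact ⟨u ++ x :: v1, y, v2, by simp, x, by simp, hs⟩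
  · rintro ⟨u, x, v, rfl, z, hz, hs⟩
    rcases List.append_of_mem hz with ⟨u1, u2, rfl⟩
    exact ⟨u1, z, u2 ++ x :: v, by simp, x, by simp, hs⟩

-- the suffix-prefix decomposition of A's subarray check equals B's infix form
lemma sub_infix (soma : Int) (l : List Int) :
    (∃ u x v, l = u ++ x :: v ∧ ∃ c, c <+: v ∧ c ≠ [] ∧ x + c.sum = soma) ↔
    (∃ u m v, l = u ++ m ++ v ∧ 2 ≤ m.length ∧ m.sum = soma) := by
  constructor
  · rintro ⟨u, x, v, rfl, c, ⟨w, rfl⟩, hne, hs⟩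
    refine ⟨u, x :: c, w, by simp, ?_, by simpa using hs⟩
    have := List.length_pos_iff.mpr hne
    simp only [List.length_cons]; omega
  · rintro ⟨u, m, v, rfl, hm, hs⟩
    rcases m with _ | ⟨x, c⟩
    · simp at hm
    · have hne : c ≠ [] := by
        intro hnil; rw [hnil] at hm; simp at hm
      exact ⟨u, x, c ++ v, by simp, c, ⟨v, rfl⟩, hne, by simpa using hs⟩

lemma condA_iff_b (soma : Int) (l : List Int) :
    CondA soma l ↔ (bTwo soma PySem.Set.empty l = true ∨ bPref soma PySem.Set.empty 0 l = true) := by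
  rw [bTwo_iff soma l PySem.Set.empty, bPref_iff soma l PySem.Set.empty 0]
  have hempty : ∀ z : Int, z ∈ (PySem.Set.empty : PySem.Set Int) ↔ False := by
    intro z; simp [PySem.Set.empty]
  constructor
  · rintro ⟨u, x, v, rfl, h1 | h2 | h3⟩
    · exact Or.inl ⟨u, x, v, rfl, Or.inl h1⟩
    · rcases (pair_symm soma _).mp ⟨u, x, v, rfl, h2⟩ with ⟨u', x', v', heq, z, hz, hs⟩
      exact Or.inl ⟨u', x', v', heq, Or.inr ⟨z, Or.inr hz, hs⟩⟩
    · rcases (sub_infix soma _).mp ⟨u, x, v, rfl, h3⟩ with ⟨u', m, v', heq, hm, hs⟩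
      exact Or.inr (Or.inr ⟨u', m, v', heq, hm, hs⟩)
  · rintro (⟨u, x, v, rfl, h1 | ⟨z, hz, hs⟩⟩ | h | h)
    · exact ⟨u, x, v, rfl, Or.inl h1⟩
    · rcases hz with hz | hz
      · exact absurd hz (by simpa using hempty z)
      · rcases (pair_symm soma _).mpr ⟨u, x, v, rfl, z, hz, hs⟩ with ⟨u', x', v', heq, y, hy, hs'⟩
        exact ⟨u', x', v', heq, Or.inr (Or.inl ⟨y, hy, hs'⟩)⟩
    · rcases h with ⟨c, -, -, hmem⟩
      exact absurd hmem (by simpa using hempty _)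
    · rcases (sub_infix soma l).mpr h with ⟨u, x, v, heq, hc⟩
      exact ⟨u, x, v, heq, Or.inr (Or.inr hc)⟩

-- ===== VERDICT (by name: the statement is the Claim_ definition above) =====
theorem verifica_somas_spec : Claim_equal_verifica_somas := by
  intro lista soma _
  unfold Spec_verifica_somas verifica_somas verifica_somas_alt
  by_cases hc : CondA soma lista
  · rw [(aGo_eq_one_iff soma lista).mpr hc]
    rcases (condA_iff_b soma lista).mp hc with h | h
    · rw [if_pos h]
    · split_ifs <;> rfl
  · have ha : aGo soma lista = -1 := by
      rcases aGo_one_or_neg soma lista with h | h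
      · exact absurd ((aGo_eq_one_iff soma lista).mp h) hc
      · exact h
    rw [ha]
    have hb := (condA_iff_b soma lista).not.mp hc
    push_neg at hb
    rw [if_neg hb.1, if_neg hb.2]
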